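-- pv_equiv track=rewrite | github.com/MrBrantCode/unitest_baseline | mut_generate/mist_train_cf/cf_89457/solution.py | sum_of_primes
-- ===== SOURCE A (Python) =====
-- def sum_of_primes(numbers):
--     def is_prime(n):
--         if n < 2:
--             return False
--         for i in range(2, int(n ** 0.5) + 1):
--             if n % i == 0:
--                 return False
--         return True
--
--     prime_sum = 0
--     for num in numbers:
--         if is_prime(num) and num % 5 != 0:
--             prime_sum += num
--
--     return -1 if prime_sum == 0 else prime_sum
-- ===== SOURCE B (Python) =====
-- def sum_of_primes(numbers):
--     # Count duplicates once, then test primality once per distinct value,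
--     # using trial division by 2 and odd candidates only (alternative decomposition).
--     def is_prime(n):
--         if n < 2:
--             return False
--         if n == 2:
--             return True
--         if n % 2 == 0:
--             return False
--         i = 3
--         while i * i <= n:
--             if n % i == 0:
--                 return False
--             i += 2
--         return True
--
--     counts = {}
--     for num in numbers:
--         counts[num] = counts.get(num, 0) + 1
--     total = 0
--     for v, c in counts.items():
--         if is_prime(v) and v % 5 != 0:
--             total += v * c
--     return -1 if total == 0 else total
-- ===== Notes on version B (the rewrite author's own statement) =====
-- stated objective: alternative
-- what changed: B counts duplicates in a dict first so each distinct value is primality-tested once, and the trial division checks 2 then odd candidates only, instead of A's per-element full-range trial division.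
import Mathlib
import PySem

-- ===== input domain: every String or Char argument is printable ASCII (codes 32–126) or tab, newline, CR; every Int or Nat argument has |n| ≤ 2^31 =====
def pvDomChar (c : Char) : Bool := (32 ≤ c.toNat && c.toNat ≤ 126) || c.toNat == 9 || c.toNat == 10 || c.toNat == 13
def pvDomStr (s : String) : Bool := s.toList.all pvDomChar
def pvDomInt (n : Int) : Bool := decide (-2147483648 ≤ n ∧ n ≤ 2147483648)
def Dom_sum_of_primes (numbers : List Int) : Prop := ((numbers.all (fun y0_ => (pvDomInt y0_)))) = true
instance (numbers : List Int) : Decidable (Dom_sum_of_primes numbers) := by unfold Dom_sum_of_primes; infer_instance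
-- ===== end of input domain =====

-- B counts duplicates in a dict so each distinct value is primality-tested once, with an odd-only
-- trial division; objective: alternative. Return values proved equal on all inputs.

-- ===== PORT A =====
-- is_prime of A: trial division over range(2, int(n ** 0.5) + 1).
-- int(n ** 0.5) is ported as Nat.sqrt n.toNat: exact for 0 ≤ n ≤ 2^31 (the domain), where the
-- double-precision sqrt rounds to the true integer square root.
def aIsPrime (n : Int) : Bool :=
  if n < 2 then false
  else (PySem.List.pyRange 2 ((Nat.sqrt n.toNat : Int) + 1) 1).all
        (fun i => !(PySem.Int.mod n i == 0))

def sum_of_primes (numbers : List Int) : Int :=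
  let primeSum : Int :=
    numbers.foldl (fun acc num =>
      if aIsPrime num && !(PySem.Int.mod num 5 == 0) then acc + num else acc) 0
  if primeSum == 0 then -1 else primeSum

-- ===== PORT B =====
-- the odd-candidate while loop of B's is_prime
def bOddLoop (n : Int) (i : Int) : Bool :=
  if h : i * i ≤ n then
    (if PySem.Int.mod n i == 0 then false else bOddLoop n (i + 2))
  else true
termination_by (n + 3 - i).toNat
decreasing_by
  have h1 : i ≤ n := by nlinarith [sq_nonneg (i - 1)]
  omega

def bIsPrime (n : Int) : Bool :=
  if n < 2 then false
  else if n == 2 then true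
  else if PySem.Int.mod n 2 == 0 then false
  else bOddLoop n 3

def sum_of_primes_alt (numbers : List Int) : Int :=
  let counts : PySem.Dict Int Int :=
    numbers.foldl (fun d x => d.insert x (d.getD x 0 + 1)) PySem.Dict.empty
  let total : Int :=
    counts.items.foldl (fun acc p =>
      if bIsPrime p.1 && !(PySem.Int.mod p.1 5 == 0) then acc + p.1 * p.2 else acc) 0
  if total == 0 then -1 else total

-- ===== PRECONDITION & SPEC =====
def Spec_sum_of_primes (numbers : List Int) (out : Int) : Prop := out = sum_of_primes_alt numbers
instance (numbers : List Int) (out : Int) : Decidable (Spec_sum_of_primes numbers out) := by unfold Spec_sum_of_primes; infer_instance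

-- ===== CLAIM (what is proved, stated in full; the proofs are below) =====
def Claim_equal_sum_of_primes : Prop := ∀ (numbers : List Int), Dom_sum_of_primes numbers → Spec_sum_of_primes numbers (sum_of_primes numbers)

-- ===== LEMMAS AND PROOFS =====

-- i ≤ int-sqrt(n) ↔ i*i ≤ n, for 0 ≤ n, 0 ≤ i
theorem lt_sqrt_succ_iff (n i : Int) (hn : 0 ≤ n) (hi : 0 ≤ i) :
    i < (Nat.sqrt n.toNat : Int) + 1 ↔ i * i ≤ n := by
  have e : ((i.toNat : Int)) = i := Int.toNat_of_nonneg hi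
  have en : ((n.toNat : Int)) = n := Int.toNat_of_nonneg hn
  constructor
  · intro h
    have h' : i.toNat ≤ Nat.sqrt n.toNat := by omega
    have h1 : i.toNat * i.toNat ≤ n.toNat := Nat.le_sqrt.mp h'
    calc i * i = ((i.toNat * i.toNat : Nat) : Int) := by push_cast [e]; ring
    _ ≤ ((n.toNat : Nat) : Int) := by exact_mod_cast h1
    _ = n := en
  · intro h
    have h1 : i.toNat * i.toNat ≤ n.toNat := by
      have : ((i.toNat * i.toNat : Nat) : Int) ≤ ((n.toNat : Nat) : Int) := by
        push_cast [e, en]; nlinarith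
      exact_mod_cast this
    have := Nat.le_sqrt.mpr h1
    omega

-- characterisation of A's primality test
theorem aIsPrime_iff (n : Int) :
    aIsPrime n = true ↔ (2 ≤ n ∧ ∀ i : Int, 2 ≤ i → i * i ≤ n → PySem.Int.mod n i ≠ 0) := by
  unfold aIsPrime
  by_cases hn : n < 2
  · simp only [if_pos hn, Bool.false_eq_true, false_iff, not_and]
    intro h; omega
  · rw [if_neg hn, List.all_eq_true]
    have hn2 : (2:Int) ≤ n := by omega
    constructor
    · intro h
      refine ⟨hn2, fun i hi hisq => ?_⟩
      have hmem : i ∈ PySem.List.pyRange 2 ((Nat.sqrt n.toNat : Int) + 1) 1 := by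
        rw [PySem.List.mem_pyRange_one]
        exact ⟨hi, (lt_sqrt_succ_iff n i (by omega) (by omega)).mpr hisq⟩
      simpa using h i hmem
    · rintro ⟨-, h⟩ i hmem
      rw [PySem.List.mem_pyRange_one] at hmem
      have := h i hmem.1 ((lt_sqrt_succ_iff n i (by omega) (by omega)).mp hmem.2)
      simpa using this

-- characterisation of the odd-step while loop
theorem bOddLoop_iff (n i : Int) :
    1 ≤ i → (bOddLoop n i = true ↔
      ∀ j : Int, i ≤ j → (2 ∣ (j - i)) → j * j ≤ n → PySem.Int.mod n j ≠ 0) := by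
  induction i using bOddLoop.induct (n := n) with
  | case1 i h hmod =>
    intro hi
    rw [bOddLoop, dif_pos h, if_pos hmod]
    simp only [Bool.false_eq_true, false_iff, not_forall]
    exact ⟨i, le_refl i, by omega, h, by simp_all⟩
  | case2 i h hmod ih =>
    intro hi
    rw [bOddLoop, dif_pos h, if_neg hmod]
    rw [ih (by omega)]
    constructor
    · intro hall j hj hdvd hjsq
      rcases eq_or_lt_of_le hj with rfl | hlt
      · simpa using hmod
      · exact hall j (by omega) (by omega) hjsq
    · intro hall j hj hdvd hjsq
      exact hall j (by omega) (by omega) hjsq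
  | case3 i h =>
    intro hi
    rw [bOddLoop, dif_neg h]
    simp only [true_iff]
    intro j hj hdvd hjsq
    exfalso
    have : i * i ≤ j * j := by nlinarith
    omega

-- the two primality tests agree on every integer
theorem prime_agree (n : Int) : bIsPrime n = aIsPrime n := by
  by_cases h2 : n < 2
  · unfold bIsPrime aIsPrime; rw [if_pos h2, if_pos h2]
  · rcases eq_or_lt_of_le (by omega : (2:Int) ≤ n) with rfl | h3
    · have hA : aIsPrime 2 = true := by
        rw [aIsPrime_iff]
        exact ⟨le_refl 2, fun i hi hisq => by exfalso; nlinarith⟩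
      have hB : bIsPrime 2 = true := by unfold bIsPrime; norm_num
      rw [hA, hB]
    · have hne : ¬(n == 2) = true := by simp; omega
      by_cases heven : PySem.Int.mod n 2 = 0
      · have hdvd : (2 : Int) ∣ n := (PySem.Int.mod_eq_zero_iff_dvd n 2).mp heven
        have hA : aIsPrime n = false := by
          rw [Bool.eq_false_iff, Ne, aIsPrime_iff]
          rintro ⟨-, h⟩
          exact h 2 (by omega) (by omega) heven
        have hB : bIsPrime n = false := by
          unfold bIsPrime
          rw [if_neg (by omega), if_neg hne, if_pos (by simpa using heven)]
        rw [hA, hB]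
      · unfold bIsPrime
        rw [if_neg (by omega), if_neg hne, if_neg (by simpa using heven)]
        rw [Bool.eq_iff_iff, bOddLoop_iff n 3 (by omega), aIsPrime_iff]
        constructor
        · intro hall
          refine ⟨by omega, fun i hi hisq => ?_⟩
          by_cases hie : 2 ∣ i
          · intro hc
            have hdv : i ∣ n := (PySem.Int.mod_eq_zero_iff_dvd n i).mp hc
            exact heven ((PySem.Int.mod_eq_zero_iff_dvd n 2).mpr (dvd_trans hie hdv))
          · have hi3 : (3:Int) ≤ i := by omega
            exact hall i hi3 (by omega) hisq
        · rintro ⟨-, h⟩ j hj hdvd hjsq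
          exact h j (by omega) hjsq

-- summing v * count(v) over the counter's items equals summing over the list
theorem sum_agree (l : List Int) (f : Int → Bool) :
    ((PySem.Dict.counter l).items.foldl (fun acc p =>
      if f p.1 then acc + p.1 * p.2 else acc) 0 : Int)
      = l.foldl (fun acc x => if f x then acc + x else acc) 0 := by
  rw [PySem.Dict.items_counter, List.foldl_map]
  dsimp only
  rw [PySem.List.foldl_if_eq_foldl_filter (p := f) (f := fun acc v => acc + v * (l.count v : Int))]
  rw [PySem.List.foldl_if_eq_foldl_filter (p := f) (f := fun acc x => acc + x)]
  rw [PySem.List.foldl_add (g := fun v => v * (l.count v : Int))]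
  rw [PySem.List.foldl_add (g := fun x => x)]
  simp only [zero_add]
  set S := (PySem.Set.ofList l).filter f with hS
  set l' := l.filter f with hl'
  have hnd : S.Nodup := (PySem.Set.nodup_ofList l).filter f
  have hmem : ∀ v, v ∈ S ↔ v ∈ l' := by
    intro v
    rw [hS, hl', List.mem_filter, List.mem_filter, PySem.Set.mem_ofList]
  have hcnt : ∀ v ∈ S, l.count v = l'.count v := by
    intro v hv
    rw [hS] at hv
    have hf : f v = true := (List.mem_filter.mp hv).2
    rw [hl']
    exact (List.count_filter hf).symm
  have step1 : (S.map (fun v => v * (l.count v : Int))).sum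
      = (S.map (fun v => v * (l'.count v : Int))).sum := by
    apply congrArg
    apply List.map_congr_left
    intro v hv
    rw [hcnt v hv]
  rw [step1]
  have step2 : (S.map (fun v => v * (l'.count v : Int))).sum
      = ∑ v ∈ S.toFinset, v * (l'.count v : Int) :=
    (List.sum_toFinset _ hnd).symm
  have hfs : S.toFinset = l'.toFinset := by
    apply Finset.ext
    intro v
    simp only [List.mem_toFinset]
    exact hmem v
  rw [step2, hfs]
  have step3 : (l'.map (fun x => x)).sum = ∑ m ∈ l'.toFinset, l'.count m • m := by
    simpa using Finset.sum_list_map_count l' (id : Int → Int)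
  rw [step3]
  apply Finset.sum_congr rfl
  intro v _
  rw [nsmul_eq_mul, mul_comm]

-- ===== VERDICT (by name: the statement is the Claim_ definition above) =====
theorem sum_of_primes_spec : Claim_equal_sum_of_primes := by
  intro numbers _
  unfold Spec_sum_of_primes sum_of_primes sum_of_primes_alt
  rw [PySem.Dict.foldl_insert_getD_add_one_eq_counter]
  simp only [prime_agree]
  rw [sum_agree numbers (fun v => aIsPrime v && !(PySem.Int.mod v 5 == 0))]
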